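-- pv_equiv track=rewrite | github.com/Celsuss/AdventOfCode2018 | DayTwo.py | GetMatchingBoxes
-- ===== SOURCE A (Python) =====
-- def GetMatchingBoxes(ids):
--     matchingIds = []
--     uniqueIds = []
--     for id in ids:
--         if len(uniqueIds) == 0:
--             uniqueIds.append(id)
--             continue
--
--         match = False
--         for uId in uniqueIds:
--             sum = [c for c, d in zip(id, uId) if c == d]
--             if len(sum) >= len(ids[0])-1:
--                 match = True
--                 if uId not in matchingIds:
--                     matchingIds.append(uId)
--                 if id not in matchingIds:
--                     matchingIds.append(id)
--                 break
--
--         if match == False: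
--             uniqueIds.append(id)
--
--     return matchingIds
-- ===== SOURCE B (Python) =====
-- def _matches(s, u, t):
--     # eq-count >= t  <=>  mismatches over zip <= min(len(s), len(u)) - t; exit early
--     allowed = min(len(s), len(u)) - t
--     if allowed < 0:
--         return False
--     bad = 0
--     for c, d in zip(s, u):
--         if c != d:
--             bad += 1
--             if bad > allowed:
--                 return False
--     return True
--
-- def GetMatchingBoxes(ids):
--     if not ids:
--         return []
--     t = len(ids[0]) - 1
--     # Sieve by rounds: the head of the remaining list is a unique; one sweep
--     # removes everything it matches (recording the match events), and the
--     # survivors form the next round.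
--     remaining = list(enumerate(ids))
--     events = []  # (original index of matched id, unique, matched id)
--     while remaining:
--         (_, u), rest = remaining[0], remaining[1:]
--         keep = []
--         for i, s in rest:
--             if _matches(s, u, t):
--                 events.append((i, u, s))
--             else:
--                 keep.append((i, s))
--         remaining = keep
--     events.sort(key=lambda e: e[0])
--     out = []
--     seen = set()
--     for _, u, s in events:
--         for x in (u, s):
--             if x not in seen:
--                 seen.add(x)
--                 out.append(x)
--     return out
-- ===== Notes on version B (the rewrite author's own statement) =====
-- stated objective: alternative
-- what changed: B replaces A's per-id scan of a growing unique list by a sieve: repeated rounds take the head of the remaining list as a unique and sweep out every id it matches in one partition pass (the match test counts mismatches against a budget and exits early), recording index-tagged match events; the events are then sorted by original index and deduplicated in a final pass.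
import Mathlib
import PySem

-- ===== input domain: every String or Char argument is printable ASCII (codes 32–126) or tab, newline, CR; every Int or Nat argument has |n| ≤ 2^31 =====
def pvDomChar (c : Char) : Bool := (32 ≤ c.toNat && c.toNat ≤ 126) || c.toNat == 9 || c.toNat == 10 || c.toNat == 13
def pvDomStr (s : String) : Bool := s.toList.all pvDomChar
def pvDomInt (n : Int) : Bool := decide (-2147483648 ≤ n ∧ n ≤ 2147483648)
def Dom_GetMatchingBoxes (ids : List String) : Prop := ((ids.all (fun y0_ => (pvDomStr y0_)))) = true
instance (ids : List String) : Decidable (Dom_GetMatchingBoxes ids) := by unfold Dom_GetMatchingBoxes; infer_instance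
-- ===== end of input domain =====

-- B replaces A's per-id scan of a growing unique list by a sieve: rounds that take the head
-- survivor as a unique and sweep out everything it matches, then sort events by original index
-- and deduplicate (objective: alternative; same O(n^2 L) worst-case cost).

-- ===== PORT A =====
-- inner 'for uId in uniqueIds' loop with its break; returns the updated matchingIds on a match
def pvAInner (firstLen : Int) (id : String) (matching : List String) : List String → Option (List String)
  | [] => none
  | uId :: rest =>
      if firstLen - 1 ≤ ((((id.toList.zip uId.toList).filter (fun cd => cd.1 == cd.2)).length : Int)) then
        let m1 := if matching.contains uId then matching else matching ++ [uId]
        let m2 := if m1.contains id then m1 else m1 ++ [id]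
        some m2
      else pvAInner firstLen id matching rest

-- one iteration of the outer 'for id in ids' loop; state = (matchingIds, uniqueIds)
def pvAStep (firstLen : Int) (st : List String × List String) (id : String) : List String × List String :=
  if st.2.length == 0 then (st.1, st.2 ++ [id])
  else
    match pvAInner firstLen id st.1 st.2 with
    | some m => (m, st.2)
    | none   => (st.1, st.2 ++ [id])

-- len(ids[0]) is only evaluated inside the inner loop, where ids is necessarily nonempty,
-- so the headD default is never the value actually used.
def GetMatchingBoxes (ids : List String) : List String :=
  (ids.foldl (pvAStep (PySem.Str.len (ids.headD ""))) ([], [])).1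

-- ===== PORT B =====
-- _matches' early-exit loop: count mismatches, fail as soon as the budget is exceeded
def pvBadLoop (allowed bad : Int) : List (Char × Char) → Bool
  | [] => true
  | cd :: rest =>
      if cd.1 ≠ cd.2 then
        (if allowed < bad + 1 then false else pvBadLoop allowed (bad + 1) rest)
      else pvBadLoop allowed bad rest

-- Source B's _matches(s, u, t)
def pvMatchB (t : Int) (u s : String) : Bool :=
  let allowed : Int := min (PySem.Str.len s) (PySem.Str.len u) - t
  if allowed < 0 then false
  else pvBadLoop allowed 0 (s.toList.zip u.toList)

-- Source B's while-loop: each round pops the head as a unique, records the events for the ids it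
-- matches and keeps the survivors (the one sweep is a partition: the filter / ¬filter pair).
def pvSieve (t : Int) : List (Int × String) → List (Int × String × String)
  | [] => []
  | (_, u) :: rest =>
      (rest.filter (fun p => pvMatchB t u p.2)).map (fun p => (p.1, u, p.2))
        ++ pvSieve t (rest.filter (fun p => !pvMatchB t u p.2))
  termination_by l => l.length
  decreasing_by simp; exact (List.length_filter_le _ _).trans (by simp)

-- 'if x not in seen: seen.add(x); out.append(x)'; state = (out, seen)
def pvEmit (st : List String × PySem.Set String) (x : String) : List String × PySem.Set String :=
  if PySem.Set.contains st.2 x then st else (st.1 ++ [x], PySem.Set.add st.2 x)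

def GetMatchingBoxes_alt (ids : List String) : List String :=
  match ids with
  | [] => []
  | h :: _ =>
      let t : Int := PySem.Str.len h - 1
      let events := pvSieve t (PySem.List.enumerate ids)
      let sortedEvents := PySem.List.sorted events (fun e => e.1) false
      (sortedEvents.foldl (fun st e => pvEmit (pvEmit st e.2.1) e.2.2) ([], PySem.Set.empty)).1

-- ===== PRECONDITION & SPEC =====
def Spec_GetMatchingBoxes (ids : List String) (out : List String) : Prop := out = GetMatchingBoxes_alt ids
instance (ids : List String) (out : List String) : Decidable (Spec_GetMatchingBoxes ids out) := by unfold Spec_GetMatchingBoxes; infer_instance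

-- ===== CLAIM (what is proved, stated in full; the proofs are below) =====
def Claim_equal_GetMatchingBoxes : Prop := ∀ (ids : List String), Dom_GetMatchingBoxes ids → Spec_GetMatchingBoxes ids (GetMatchingBoxes ids)

-- ===== LEMMAS AND PROOFS =====

-- A's "if x not in matchingIds: append"
def pvIns (acc : List String) (x : String) : List String :=
  if acc.contains x then acc else acc ++ [x]

-- proof-side plain match test: eq-count >= t (what _matches computes, without the early exit)
def pvMatch (t : Int) (u s : String) : Bool :=
  decide (t ≤ (((s.toList.zip u.toList).countP (fun cd => cd.1 == cd.2)) : Int))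

theorem countP_not_add (l : List (Char × Char)) :
    l.countP (fun cd => !(cd.1 == cd.2)) + l.countP (fun cd => cd.1 == cd.2) = l.length := by
  have h := List.length_eq_countP_add_countP (p := fun cd : Char × Char => cd.1 == cd.2) (l := l)
  have hc : l.countP (fun a : Char × Char => decide ¬((fun cd : Char × Char => cd.1 == cd.2) a = true))
      = l.countP (fun cd => !(cd.1 == cd.2)) := List.countP_congr (by intro a _; simp)
  rw [hc] at h
  omega

theorem pvBadLoop_eq (allowed : Int) :
    ∀ (l : List (Char × Char)) (bad : Int), bad ≤ allowed →
      pvBadLoop allowed bad l = decide (((l.countP (fun cd => !(cd.1 == cd.2))) : Int) ≤ allowed - bad) := by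
  intro l
  induction l with
  | nil =>
      intro bad hb
      rw [pvBadLoop]
      symm
      simp only [List.countP_nil, Nat.cast_zero, decide_eq_true_iff]
      omega
  | cons cd rest ih =>
      intro bad hb
      rw [pvBadLoop]
      by_cases hcd : cd.1 = cd.2
      · have heq : (cd.1 == cd.2) = true := by simp [hcd]
        rw [if_neg (by simpa using hcd), ih bad hb]
        simp [heq]
      · have hne : (cd.1 == cd.2) = false := by simp [hcd]
        rw [if_pos hcd]
        by_cases hover : allowed < bad + 1
        · rw [if_pos hover]
          symm
          rw [decide_eq_false_iff_not]
          have h0 : (0:Int) ≤ (rest.countP (fun cd => !(cd.1 == cd.2)) : Int) := Int.natCast_nonneg _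
          simp only [List.countP_cons, hne, Bool.not_false, if_pos]
          push_cast
          omega
        · rw [if_neg hover, ih (bad + 1) (by omega)]
          simp only [List.countP_cons, hne, Bool.not_false, decide_eq_decide]
          push_cast
          omega

theorem pvMatchB_eq (t : Int) (u s : String) : pvMatchB t u s = pvMatch t u s := by
  unfold pvMatchB pvMatch
  have hsum := countP_not_add (s.toList.zip u.toList)
  have hlen : min (PySem.Str.len s) (PySem.Str.len u)
      = (((s.toList.zip u.toList).length : Nat) : Int) := by
    simp only [PySem.Str.len_eq, List.length_zip]
    push_cast
    omega
  rw [hlen]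
  by_cases hneg : (((s.toList.zip u.toList).length : Int)) - t < 0
  · rw [if_pos hneg]
    symm
    rw [decide_eq_false_iff_not]
    have hle : (s.toList.zip u.toList).countP (fun cd => cd.1 == cd.2)
        ≤ (s.toList.zip u.toList).length := List.countP_le_length
    omega
  · rw [if_neg hneg, pvBadLoop_eq _ _ 0 (by omega)]
    simp only [decide_eq_decide]
    omega

-- proof-side sequential machine: A's process, recording match events with their indices
def pvSeq (t : Int) (us : List String) : List (Int × String) → List (Int × String × String)
  | [] => []
  | (i, s) :: rest =>
      match us.find? (fun u => pvMatch t u s) with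
      | some u => (i, u, s) :: pvSeq t us rest
      | none   => pvSeq t (us ++ [s]) rest

theorem pvAInner_eq_find (fl : Int) (id : String) (m : List String) :
    ∀ us : List String,
      pvAInner fl id m us = (us.find? (fun u => pvMatch (fl - 1) u id)).map (fun u => pvIns (pvIns m u) id) := by
  intro us
  induction us with
  | nil => rfl
  | cons u rest ih =>
      simp only [pvAInner, List.find?]
      have hpred : pvMatch (fl - 1) u id =
          decide (fl - 1 ≤ ((((id.toList.zip u.toList).filter (fun cd => cd.1 == cd.2)).length : Int))) := by
        simp [pvMatch, List.countP_eq_length_filter]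
      by_cases h : fl - 1 ≤ ((((id.toList.zip u.toList).filter (fun cd => cd.1 == cd.2)).length : Int))
      · rw [if_pos h, hpred, decide_eq_true h]
        simp [pvIns]
      · rw [if_neg h, hpred, decide_eq_false h]
        simpa using ih

-- A's fold = fold of pvIns over the sequential events
theorem pvA_fold_eq (fl : Int) :
    ∀ (l : List (Int × String)) (m us : List String), us ≠ [] →
      ((l.map Prod.snd).foldl (pvAStep fl) (m, us)).1
        = (pvSeq (fl - 1) us l).foldl (fun acc e => pvIns (pvIns acc e.2.1) e.2.2) m := by
  intro l
  induction l with
  | nil => intro m us _; rfl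
  | cons p rest ih =>
      obtain ⟨i, s⟩ := p
      intro m us hus
      have hlen : (us.length == 0) = false := by
        cases us with
        | nil => exact absurd rfl hus
        | cons a l => simp
      simp only [List.map_cons, List.foldl_cons, pvAStep, hlen, Bool.false_eq_true, if_false,
        pvAInner_eq_find, pvSeq]
      cases hfind : us.find? (fun u => pvMatch (fl - 1) u s) with
      | none =>
          simp only [Option.map_none]
          exact ih m (us ++ [s]) (by simp)
      | some u =>
          simp only [Option.map_some, List.foldl_cons]
          exact ih (pvIns (pvIns m u) s) us hus

-- one sieve round, seen from the sequential machine (up to permutation)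
theorem pvSeq_perm_round (t : Int) (u : String) :
    ∀ (l : List (Int × String)) (us : List String),
      (pvSeq t (u :: us) l).Perm
        (((l.filter (fun p => pvMatch t u p.2)).map (fun p => (p.1, u, p.2)))
          ++ pvSeq t us (l.filter (fun p => !pvMatch t u p.2))) := by
  intro l
  induction l with
  | nil => intro us; rfl
  | cons p rest ih =>
      obtain ⟨i, s⟩ := p
      intro us
      by_cases hm : pvMatch t u s
      · simp only [pvSeq, List.find?, hm, List.filter_cons, Bool.not_true]
        exact (ih us).cons _
      · have hm2 : pvMatch t u s = false := by simpa using hm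
        cases hfind : us.find? (fun u' => pvMatch t u' s) with
        | some u' =>
            simp only [pvSeq, List.find?, hm2, List.filter_cons, Bool.not_false, if_true,
              Bool.false_eq_true, if_false, hfind]
            exact ((ih us).cons _).trans List.perm_middle.symm
        | none =>
            simp only [pvSeq, List.find?, hm2, List.filter_cons, Bool.not_false, if_true,
              Bool.false_eq_true, if_false, hfind, List.cons_append]
            exact ih (us ++ [s])

-- the sieve computes the sequential events up to permutation
theorem pvSieve_nil (t : Int) : pvSieve t [] = [] := by
  rw [pvSieve]

theorem pvSieve_cons (t : Int) (i : Int) (u : String) (rest : List (Int × String)) :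
    pvSieve t ((i, u) :: rest) =
      (rest.filter (fun p => pvMatch t u p.2)).map (fun p => (p.1, u, p.2))
        ++ pvSieve t (rest.filter (fun p => !pvMatch t u p.2)) := by
  rw [pvSieve]
  simp only [pvMatchB_eq]

theorem pvSeq_perm_sieve (t : Int) :
    ∀ (n : Nat) (l : List (Int × String)), l.length ≤ n → (pvSeq t [] l).Perm (pvSieve t l) := by
  intro n
  induction n with
  | zero =>
      intro l hl
      have : l = [] := List.length_eq_zero_iff.mp (Nat.le_zero.mp hl)
      subst this
      rw [pvSieve_nil]
      exact List.Perm.refl _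
  | succ n ih =>
      intro l hl
      cases l with
      | nil => rw [pvSieve_nil]; exact List.Perm.refl _
      | cons p rest =>
          obtain ⟨i, u⟩ := p
          have h1 : pvSeq t [] ((i, u) :: rest) = pvSeq t [u] rest := by
            simp [pvSeq, List.find?]
          have h3 : (pvSeq t [] (rest.filter (fun p => !pvMatch t u p.2))).Perm
              (pvSieve t (rest.filter (fun p => !pvMatch t u p.2))) := by
            refine ih _ ?_
            have := List.length_filter_le (fun p => !pvMatch t u p.2) rest
            simp only [List.length_cons] at hl
            omega
          rw [h1, pvSieve_cons]
          exact (pvSeq_perm_round t u rest []).trans (h3.append_left _)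

-- the sequential events keep a subsequence of the input's indices
theorem pvSeq_idx_sublist (t : Int) :
    ∀ (l : List (Int × String)) (us : List String),
      ((pvSeq t us l).map (fun e => e.1)).Sublist (l.map (fun p => p.1)) := by
  intro l
  induction l with
  | nil => intro us; simp [pvSeq]
  | cons p rest ih =>
      obtain ⟨i, s⟩ := p
      intro us
      simp only [pvSeq, List.map_cons]
      cases hfind : us.find? (fun u => pvMatch t u s) with
      | some u => exact (ih us).cons₂ _
      | none => exact (ih (us ++ [s])).cons _

-- sorting the sieve's events by index recovers the sequential order
theorem pvSorted_sieve_eq_seq (t : Int) (xs : List String) :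
    PySem.List.sorted (pvSieve t (PySem.List.enumerate xs)) (fun e => e.1) false
      = pvSeq t [] (PySem.List.enumerate xs) := by
  apply PySem.List.sorted_eq_of_perm_of_pairwise_lt
  · exact pvSeq_perm_sieve t _ _ le_rfl
  · have hidx : ((PySem.List.enumerate xs).map (fun p => p.1)).Pairwise (· < ·) :=
      List.pairwise_map.mpr (PySem.List.pairwise_lt_enumerate xs 0)
    exact List.pairwise_map.mp (List.Pairwise.sublist (pvSeq_idx_sublist t (PySem.List.enumerate xs) []) hidx)

-- the (out, seen) emit fold, with seen = out, is the pvIns fold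
theorem pvEmit_fold_eq (evs : List (Int × String × String)) :
    ∀ (m : List String),
      ((evs.foldl (fun st e => pvEmit (pvEmit st e.2.1) e.2.2) (m, m)).1)
        = evs.foldl (fun acc e => pvIns (pvIns acc e.2.1) e.2.2) m := by
  induction evs with
  | nil => intro m; rfl
  | cons e rest ih =>
      intro m
      have hstep : ∀ (mm : List String) (x : String), pvEmit (mm, mm) x = (pvIns mm x, pvIns mm x) := by
        intro mm x
        simp only [pvEmit, pvIns, PySem.Set.contains, PySem.Set.add]
        split_ifs <;> rfl
      simp only [List.foldl_cons, hstep]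
      exact ih _

-- ===== VERDICT (by name: the statement is the Claim_ definition above) =====
theorem GetMatchingBoxes_spec : Claim_equal_GetMatchingBoxes := by
  intro ids _
  unfold Spec_GetMatchingBoxes
  cases ids with
  | nil => rfl
  | cons h rest =>
      show (((h :: rest).foldl (pvAStep (PySem.Str.len ((h :: rest).headD ""))) ([], [])).1) = _
      have hfirst : ((h :: rest).foldl (pvAStep (PySem.Str.len h)) ([], [])) =
          rest.foldl (pvAStep (PySem.Str.len h)) ([], [h]) := by
        simp [pvAStep]
      have henum : PySem.List.enumerate (h :: rest) = (0, h) :: PySem.List.enumerate rest 1 :=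
        PySem.List.enumerate_cons h rest 0
      have hseq0 : pvSeq (PySem.Str.len h - 1) [] (PySem.List.enumerate (h :: rest))
          = pvSeq (PySem.Str.len h - 1) [h] (PySem.List.enumerate rest 1) := by
        rw [henum]; simp [pvSeq, List.find?]
      have hmap : (PySem.List.enumerate rest 1).map Prod.snd = rest := by
        simp [PySem.List.map_snd_enumerate]
      have hA := pvA_fold_eq (PySem.Str.len h) (PySem.List.enumerate rest 1) [] [h] (by simp)
      rw [hmap] at hA
      have hB : GetMatchingBoxes_alt (h :: rest)
          = List.foldl (fun acc e => pvIns (pvIns acc e.2.1) e.2.2) []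
              (pvSeq (PySem.Str.len h - 1) [h] (PySem.List.enumerate rest 1)) := by
        unfold GetMatchingBoxes_alt
        simp only [pvSorted_sieve_eq_seq, hseq0]
        exact pvEmit_fold_eq _ []
      simp only [List.headD_cons, hfirst, hA, hB]
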